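-- pv_equiv track=rewrite | github.com/mr-holodok/MyKNUCryptoLabs | CryptoLab2/CryptoLab2.py | EncodeDoublePermutation
-- ===== SOURCE A (Python) =====
-- columns = [2,3,6,1,5,4]
--
-- rows = [4,1,3,2]
--
-- def EncodeDoublePermutation(msg:str) -> str:
--     mod = len(msg) % (len(rows)*len(columns))
--     if mod != 0:
--         msg += (len(rows)*len(columns) - mod) * '*'
--     encoded = list(msg)
--     encodedTwice = list(msg)
--     encodeIndex = 0
--     encodeTwiceIndex = 0
--     for tableInd in range(0, len(msg) // (len(rows)*len(columns))):
--         for i in range(0, len(rows)):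
--             for index in columns:
--                 encoded[encodeIndex] = msg[tableInd * len(rows) * len(columns) + i * len(columns) + index - 1]
--                 encodeIndex += 1
--         for i in rows:
--             for index in range(0, len(columns)):
--                 encodedTwice[encodeTwiceIndex] = encoded[tableInd * len(rows) * len(columns) + (i - 1) * len(columns) + index]
--                 encodeTwiceIndex += 1
--     encodedStr = str()
--     for i in range(0, len(encodedTwice)):
--         encodedStr += encodedTwice[i]
--     return encodedStr
-- ===== SOURCE B (Python) =====
-- columns = [2,3,6,1,5,4]
--
-- rows = [4,1,3,2]
--
-- def EncodeDoublePermutation(msg: str) -> str: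
--     block = len(rows) * len(columns)
--     r = len(msg) % block
--     if r != 0:
--         msg += '*' * (block - r)
--     perm = [(rows[p // 6] - 1) * 6 + (columns[p % 6] - 1) for p in range(block)]
--     return ''.join(msg[base + q] for base in range(0, len(msg), block) for q in perm)
-- ===== Notes on version B (the rewrite author's own statement) =====
-- stated objective: faster
-- what changed: B precomputes the composed 24-entry permutation table once and emits the output in a single table-driven join pass over 24-char blocks, instead of A's two sequential in-place column-then-row permutation passes over mutable buffers plus a final character-by-character string concatenation loop.
import Mathlib
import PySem

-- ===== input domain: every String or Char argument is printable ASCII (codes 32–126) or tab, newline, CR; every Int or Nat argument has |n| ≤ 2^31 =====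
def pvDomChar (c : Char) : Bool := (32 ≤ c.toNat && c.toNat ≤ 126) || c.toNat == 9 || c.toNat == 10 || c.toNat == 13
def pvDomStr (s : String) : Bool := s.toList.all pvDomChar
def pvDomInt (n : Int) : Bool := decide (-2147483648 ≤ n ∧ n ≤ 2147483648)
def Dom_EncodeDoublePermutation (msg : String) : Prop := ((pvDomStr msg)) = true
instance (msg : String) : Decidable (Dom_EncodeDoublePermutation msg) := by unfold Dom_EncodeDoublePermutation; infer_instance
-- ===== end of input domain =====

-- B builds the composed 24-entry permutation table once and emits the output in one
-- table-driven pass, instead of A's two sequential in-place permutation passes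
-- (measured faster in a timing run; same O(n) asymptotics).

-- ===== PORT A =====
def colsA : List Int := [2,3,6,1,5,4]
def rowsA : List Int := [4,1,3,2]

-- body of A's 'for tableInd in …' loop: the column pass then the row pass, each over
-- the running (buffer, write-index) state
def stepA (m : List Char) (st : List Char × Int × List Char × Int) (tableInd : Int) :
    List Char × Int × List Char × Int :=
  let p1 := (PySem.List.pyRange 0 (rowsA.length : Int) 1).foldl (fun (p : List Char × Int) i =>
      colsA.foldl (fun (p : List Char × Int) index =>
          (PySem.List.pySetD p.1 p.2
            (PySem.List.pyGetD m (tableInd * (rowsA.length : Int) * (colsA.length : Int) + i * (colsA.length : Int) + index - 1) ' '),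
           p.2 + 1)) p)
    (st.1, st.2.1)
  let p2 := rowsA.foldl (fun (p : List Char × Int) i =>
      (PySem.List.pyRange 0 (colsA.length : Int) 1).foldl (fun (p : List Char × Int) index =>
          (PySem.List.pySetD p.1 p.2
            (PySem.List.pyGetD p1.1 (tableInd * (rowsA.length : Int) * (colsA.length : Int) + (i - 1) * (colsA.length : Int) + index) ' '),
           p.2 + 1)) p)
    (st.2.2.1, st.2.2.2)
  (p1.1, p1.2, p2.1, p2.2)

def EncodeDoublePermutation (msg : String) : String :=
  let m0 := msg.toList
  let modv : Int := PySem.Int.mod (m0.length : Int) ((rowsA.length : Int) * (colsA.length : Int))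
  let m := if modv ≠ 0 then m0 ++ List.replicate ((rowsA.length : Int) * (colsA.length : Int) - modv).toNat '*' else m0
  let fin := (PySem.List.pyRange 0 (PySem.Int.floordiv (m.length : Int) ((rowsA.length : Int) * (colsA.length : Int))) 1).foldl (stepA m) (m, 0, m, 0)
  let encodedStr := (PySem.List.pyRange 0 (fin.2.2.1.length : Int) 1).foldl
      (fun (acc : List Char) i => acc ++ [PySem.List.pyGetD fin.2.2.1 i ' ']) []
  String.ofList encodedStr

-- ===== PORT B =====
def columnsB : List Int := [2,3,6,1,5,4]
def rowsB : List Int := [4,1,3,2]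

def EncodeDoublePermutation_alt (msg : String) : String :=
  let m0 := msg.toList
  let block : Nat := rowsB.length * columnsB.length
  let r := m0.length % block
  let m := if r ≠ 0 then m0 ++ List.replicate (block - r) '*' else m0
  let perm : List Int := (PySem.List.pyRange 0 (block : Int) 1).map (fun p =>
      (PySem.List.pyGetD rowsB (PySem.Int.floordiv p 6) 0 - 1) * 6 +
      (PySem.List.pyGetD columnsB (PySem.Int.mod p 6) 0 - 1))
  String.ofList ((PySem.List.pyRange 0 (m.length : Int) (block : Int)).flatMap
      (fun base => perm.map (fun q => PySem.List.pyGetD m (base + q) ' ')))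

-- ===== PRECONDITION & SPEC =====
def Spec_EncodeDoublePermutation (msg : String) (out : String) : Prop := out = EncodeDoublePermutation_alt msg
instance (msg : String) (out : String) : Decidable (Spec_EncodeDoublePermutation msg out) := by unfold Spec_EncodeDoublePermutation; infer_instance

-- ===== CLAIM (what is proved, stated in full; the proofs are below) =====
def Claim_equal_EncodeDoublePermutation : Prop := ∀ (msg : String), Dom_EncodeDoublePermutation msg → Spec_EncodeDoublePermutation msg (EncodeDoublePermutation msg)

-- ===== LEMMAS AND PROOFS =====

-- canonical padding to a multiple of 24
def padded (L : List Char) : List Char :=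
  if L.length % 24 = 0 then L else L ++ List.replicate (24 - L.length % 24) '*'

-- the composed double permutation, as one table
def permN : List Nat := [19,20,23,18,22,21,1,2,5,0,4,3,13,14,17,12,16,15,7,8,11,6,10,9]
-- the column pass alone
def perm1N : List Nat := [1,2,5,0,4,3,7,8,11,6,10,9,13,14,17,12,16,15,19,20,23,18,22,21]

def blockPerm (qs : List Nat) (b : List Char) : List Char := qs.map (fun q => b.getD q ' ')

-- reference result: apply qs blockwise
def specP (qs : List Nat) : List Char → Nat → List Char
  | _, 0 => []
  | b, n+1 => blockPerm qs (b.take 24) ++ specP qs (b.drop 24) n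

-- sequential writes at consecutive indices
def writeSeq : List Char × Int → List Char → List Char × Int
  | st, [] => st
  | (enc, idx), v :: vs => writeSeq (PySem.List.pySetD enc idx v, idx + 1) vs

def vals1 (m : List Char) (t : Int) : List Char :=
  [PySem.List.pyGetD m (t * 4 * 6 + 0 * 6 + 2 - 1) ' ',
   PySem.List.pyGetD m (t * 4 * 6 + 0 * 6 + 3 - 1) ' ',
   PySem.List.pyGetD m (t * 4 * 6 + 0 * 6 + 6 - 1) ' ',
   PySem.List.pyGetD m (t * 4 * 6 + 0 * 6 + 1 - 1) ' ',
   PySem.List.pyGetD m (t * 4 * 6 + 0 * 6 + 5 - 1) ' ',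
   PySem.List.pyGetD m (t * 4 * 6 + 0 * 6 + 4 - 1) ' ',
   PySem.List.pyGetD m (t * 4 * 6 + 1 * 6 + 2 - 1) ' ',
   PySem.List.pyGetD m (t * 4 * 6 + 1 * 6 + 3 - 1) ' ',
   PySem.List.pyGetD m (t * 4 * 6 + 1 * 6 + 6 - 1) ' ',
   PySem.List.pyGetD m (t * 4 * 6 + 1 * 6 + 1 - 1) ' ',
   PySem.List.pyGetD m (t * 4 * 6 + 1 * 6 + 5 - 1) ' ',
   PySem.List.pyGetD m (t * 4 * 6 + 1 * 6 + 4 - 1) ' ',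
   PySem.List.pyGetD m (t * 4 * 6 + 2 * 6 + 2 - 1) ' ',
   PySem.List.pyGetD m (t * 4 * 6 + 2 * 6 + 3 - 1) ' ',
   PySem.List.pyGetD m (t * 4 * 6 + 2 * 6 + 6 - 1) ' ',
   PySem.List.pyGetD m (t * 4 * 6 + 2 * 6 + 1 - 1) ' ',
   PySem.List.pyGetD m (t * 4 * 6 + 2 * 6 + 5 - 1) ' ',
   PySem.List.pyGetD m (t * 4 * 6 + 2 * 6 + 4 - 1) ' ',
   PySem.List.pyGetD m (t * 4 * 6 + 3 * 6 + 2 - 1) ' ',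
   PySem.List.pyGetD m (t * 4 * 6 + 3 * 6 + 3 - 1) ' ',
   PySem.List.pyGetD m (t * 4 * 6 + 3 * 6 + 6 - 1) ' ',
   PySem.List.pyGetD m (t * 4 * 6 + 3 * 6 + 1 - 1) ' ',
   PySem.List.pyGetD m (t * 4 * 6 + 3 * 6 + 5 - 1) ' ',
   PySem.List.pyGetD m (t * 4 * 6 + 3 * 6 + 4 - 1) ' ']

def vals2 (e : List Char) (t : Int) : List Char :=
  [PySem.List.pyGetD e (t * 4 * 6 + (4 - 1) * 6 + 0) ' ',
   PySem.List.pyGetD e (t * 4 * 6 + (4 - 1) * 6 + 1) ' ',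
   PySem.List.pyGetD e (t * 4 * 6 + (4 - 1) * 6 + 2) ' ',
   PySem.List.pyGetD e (t * 4 * 6 + (4 - 1) * 6 + 3) ' ',
   PySem.List.pyGetD e (t * 4 * 6 + (4 - 1) * 6 + 4) ' ',
   PySem.List.pyGetD e (t * 4 * 6 + (4 - 1) * 6 + 5) ' ',
   PySem.List.pyGetD e (t * 4 * 6 + (1 - 1) * 6 + 0) ' ',
   PySem.List.pyGetD e (t * 4 * 6 + (1 - 1) * 6 + 1) ' ',
   PySem.List.pyGetD e (t * 4 * 6 + (1 - 1) * 6 + 2) ' ',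
   PySem.List.pyGetD e (t * 4 * 6 + (1 - 1) * 6 + 3) ' ',
   PySem.List.pyGetD e (t * 4 * 6 + (1 - 1) * 6 + 4) ' ',
   PySem.List.pyGetD e (t * 4 * 6 + (1 - 1) * 6 + 5) ' ',
   PySem.List.pyGetD e (t * 4 * 6 + (3 - 1) * 6 + 0) ' ',
   PySem.List.pyGetD e (t * 4 * 6 + (3 - 1) * 6 + 1) ' ',
   PySem.List.pyGetD e (t * 4 * 6 + (3 - 1) * 6 + 2) ' ',
   PySem.List.pyGetD e (t * 4 * 6 + (3 - 1) * 6 + 3) ' ',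
   PySem.List.pyGetD e (t * 4 * 6 + (3 - 1) * 6 + 4) ' ',
   PySem.List.pyGetD e (t * 4 * 6 + (3 - 1) * 6 + 5) ' ',
   PySem.List.pyGetD e (t * 4 * 6 + (2 - 1) * 6 + 0) ' ',
   PySem.List.pyGetD e (t * 4 * 6 + (2 - 1) * 6 + 1) ' ',
   PySem.List.pyGetD e (t * 4 * 6 + (2 - 1) * 6 + 2) ' ',
   PySem.List.pyGetD e (t * 4 * 6 + (2 - 1) * 6 + 3) ' ',
   PySem.List.pyGetD e (t * 4 * 6 + (2 - 1) * 6 + 4) ' ',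
   PySem.List.pyGetD e (t * 4 * 6 + (2 - 1) * 6 + 5) ' ']

lemma r4 : PySem.List.pyRange 0 (rowsA.length : Int) 1 = [0,1,2,3] := by decide
lemma r6 : PySem.List.pyRange 0 (colsA.length : Int) 1 = [0,1,2,3,4,5] := by decide

lemma stepA_eq (m : List Char) (st : List Char × Int × List Char × Int) (t : Int) :
    stepA m st t =
      (let p1 := writeSeq (st.1, st.2.1) (vals1 m t);
       let p2 := writeSeq (st.2.2.1, st.2.2.2) (vals2 p1.1 t);
       (p1.1, p1.2, p2.1, p2.2)) := by
  unfold stepA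
  rw [r4, r6]
  simp only [List.foldl, writeSeq, vals1, vals2, colsA, rowsA, List.length_cons, List.length_nil]
  norm_num

lemma writeSeq_at : ∀ (vs d old rest : List Char) (idx : Int), idx = (d.length : Int) →
    old.length = vs.length →
    writeSeq (d ++ (old ++ rest), idx) vs = (d ++ (vs ++ rest), idx + vs.length) := by
  intro vs
  induction vs with
  | nil =>
    intro d old rest idx hidx h
    have : old = [] := List.eq_nil_of_length_eq_zero (by simpa using h)
    subst this; simp [writeSeq]
  | cons v vs ih =>
    intro d old rest idx hidx h
    cases old with
    | nil => simp at h
    | cons x old =>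
      simp only [writeSeq]
      have hset : PySem.List.pySetD (d ++ (x :: old ++ rest)) idx v = (d ++ [v]) ++ (old ++ rest) := by
        subst hidx
        rw [PySem.List.pySetD_natCast, List.set_append]
        simp
      rw [hset, ih (d ++ [v]) old rest (idx + 1) (by subst hidx; simp)
            (by simpa using h)]
      simp only [Prod.mk.injEq]
      refine ⟨by simp, by simp only [List.length_cons]; push_cast; ring⟩

lemma readm (pre l rest : List Char) (t c : Nat) (i : Int) (d : Char)
    (hpre : pre.length = 24*t) (hc : c < l.length) (hi : i = 24*t + c) :
    PySem.List.pyGetD (pre ++ (l ++ rest)) i d = l.getD c d := by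
  have h1 : i = ((pre.length + c : Nat) : Int) := by push_cast; omega
  rw [h1, PySem.List.pyGetD_natCast,
      List.getD_append_right _ _ _ _ (by omega)]
  have h2 : pre.length + c - pre.length = c := by omega
  rw [h2, List.getD_append _ _ _ _ hc]

lemma vals1_eq (pre b24 brest : List Char) (t : Nat)
    (hpre : pre.length = 24*t) (hb : b24.length = 24) :
    vals1 (pre ++ (b24 ++ brest)) (t : Int) = blockPerm perm1N b24 := by
  simp only [vals1, blockPerm, perm1N, List.map]
  rw [readm pre b24 brest t 1 _ ' ' hpre (by omega) (by push_cast; ring)]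
  rw [readm pre b24 brest t 2 _ ' ' hpre (by omega) (by push_cast; ring)]
  rw [readm pre b24 brest t 5 _ ' ' hpre (by omega) (by push_cast; ring)]
  rw [readm pre b24 brest t 0 _ ' ' hpre (by omega) (by push_cast; ring)]
  rw [readm pre b24 brest t 4 _ ' ' hpre (by omega) (by push_cast; ring)]
  rw [readm pre b24 brest t 3 _ ' ' hpre (by omega) (by push_cast; ring)]
  rw [readm pre b24 brest t 7 _ ' ' hpre (by omega) (by push_cast; ring)]
  rw [readm pre b24 brest t 8 _ ' ' hpre (by omega) (by push_cast; ring)]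
  rw [readm pre b24 brest t 11 _ ' ' hpre (by omega) (by push_cast; ring)]
  rw [readm pre b24 brest t 6 _ ' ' hpre (by omega) (by push_cast; ring)]
  rw [readm pre b24 brest t 10 _ ' ' hpre (by omega) (by push_cast; ring)]
  rw [readm pre b24 brest t 9 _ ' ' hpre (by omega) (by push_cast; ring)]
  rw [readm pre b24 brest t 13 _ ' ' hpre (by omega) (by push_cast; ring)]
  rw [readm pre b24 brest t 14 _ ' ' hpre (by omega) (by push_cast; ring)]
  rw [readm pre b24 brest t 17 _ ' ' hpre (by omega) (by push_cast; ring)]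
  rw [readm pre b24 brest t 12 _ ' ' hpre (by omega) (by push_cast; ring)]
  rw [readm pre b24 brest t 16 _ ' ' hpre (by omega) (by push_cast; ring)]
  rw [readm pre b24 brest t 15 _ ' ' hpre (by omega) (by push_cast; ring)]
  rw [readm pre b24 brest t 19 _ ' ' hpre (by omega) (by push_cast; ring)]
  rw [readm pre b24 brest t 20 _ ' ' hpre (by omega) (by push_cast; ring)]
  rw [readm pre b24 brest t 23 _ ' ' hpre (by omega) (by push_cast; ring)]
  rw [readm pre b24 brest t 18 _ ' ' hpre (by omega) (by push_cast; ring)]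
  rw [readm pre b24 brest t 22 _ ' ' hpre (by omega) (by push_cast; ring)]
  rw [readm pre b24 brest t 21 _ ' ' hpre (by omega) (by push_cast; ring)]

lemma vals2_eq (d1 b24 brest : List Char) (t : Nat)
    (hd1 : d1.length = 24*t) :
    vals2 (d1 ++ (blockPerm perm1N b24 ++ brest)) (t : Int) = blockPerm permN b24 := by
  simp only [vals2]
  rw [readm d1 (blockPerm perm1N b24) brest t 18 _ ' ' hd1 (by simp [blockPerm, perm1N]) (by push_cast; ring)]
  rw [readm d1 (blockPerm perm1N b24) brest t 19 _ ' ' hd1 (by simp [blockPerm, perm1N]) (by push_cast; ring)]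
  rw [readm d1 (blockPerm perm1N b24) brest t 20 _ ' ' hd1 (by simp [blockPerm, perm1N]) (by push_cast; ring)]
  rw [readm d1 (blockPerm perm1N b24) brest t 21 _ ' ' hd1 (by simp [blockPerm, perm1N]) (by push_cast; ring)]
  rw [readm d1 (blockPerm perm1N b24) brest t 22 _ ' ' hd1 (by simp [blockPerm, perm1N]) (by push_cast; ring)]
  rw [readm d1 (blockPerm perm1N b24) brest t 23 _ ' ' hd1 (by simp [blockPerm, perm1N]) (by push_cast; ring)]
  rw [readm d1 (blockPerm perm1N b24) brest t 0 _ ' ' hd1 (by simp [blockPerm, perm1N]) (by push_cast; ring)]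
  rw [readm d1 (blockPerm perm1N b24) brest t 1 _ ' ' hd1 (by simp [blockPerm, perm1N]) (by push_cast; ring)]
  rw [readm d1 (blockPerm perm1N b24) brest t 2 _ ' ' hd1 (by simp [blockPerm, perm1N]) (by push_cast; ring)]
  rw [readm d1 (blockPerm perm1N b24) brest t 3 _ ' ' hd1 (by simp [blockPerm, perm1N]) (by push_cast; ring)]
  rw [readm d1 (blockPerm perm1N b24) brest t 4 _ ' ' hd1 (by simp [blockPerm, perm1N]) (by push_cast; ring)]
  rw [readm d1 (blockPerm perm1N b24) brest t 5 _ ' ' hd1 (by simp [blockPerm, perm1N]) (by push_cast; ring)]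
  rw [readm d1 (blockPerm perm1N b24) brest t 12 _ ' ' hd1 (by simp [blockPerm, perm1N]) (by push_cast; ring)]
  rw [readm d1 (blockPerm perm1N b24) brest t 13 _ ' ' hd1 (by simp [blockPerm, perm1N]) (by push_cast; ring)]
  rw [readm d1 (blockPerm perm1N b24) brest t 14 _ ' ' hd1 (by simp [blockPerm, perm1N]) (by push_cast; ring)]
  rw [readm d1 (blockPerm perm1N b24) brest t 15 _ ' ' hd1 (by simp [blockPerm, perm1N]) (by push_cast; ring)]
  rw [readm d1 (blockPerm perm1N b24) brest t 16 _ ' ' hd1 (by simp [blockPerm, perm1N]) (by push_cast; ring)]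
  rw [readm d1 (blockPerm perm1N b24) brest t 17 _ ' ' hd1 (by simp [blockPerm, perm1N]) (by push_cast; ring)]
  rw [readm d1 (blockPerm perm1N b24) brest t 6 _ ' ' hd1 (by simp [blockPerm, perm1N]) (by push_cast; ring)]
  rw [readm d1 (blockPerm perm1N b24) brest t 7 _ ' ' hd1 (by simp [blockPerm, perm1N]) (by push_cast; ring)]
  rw [readm d1 (blockPerm perm1N b24) brest t 8 _ ' ' hd1 (by simp [blockPerm, perm1N]) (by push_cast; ring)]
  rw [readm d1 (blockPerm perm1N b24) brest t 9 _ ' ' hd1 (by simp [blockPerm, perm1N]) (by push_cast; ring)]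
  rw [readm d1 (blockPerm perm1N b24) brest t 10 _ ' ' hd1 (by simp [blockPerm, perm1N]) (by push_cast; ring)]
  rw [readm d1 (blockPerm perm1N b24) brest t 11 _ ' ' hd1 (by simp [blockPerm, perm1N]) (by push_cast; ring)]
  rfl

lemma length_blockPerm (qs : List Nat) (b : List Char) : (blockPerm qs b).length = qs.length := by
  simp [blockPerm]

lemma stepA_block (pre b24 brest d1 d2 : List Char) (t : Nat)
    (hpre : pre.length = 24*t) (hd1 : d1.length = 24*t) (hd2 : d2.length = 24*t)
    (hb : b24.length = 24) :
    stepA (pre ++ (b24 ++ brest))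
      (d1 ++ (b24 ++ brest), ((24*t : Nat) : Int), d2 ++ (b24 ++ brest), ((24*t : Nat) : Int))
      (t : Int)
    = (d1 ++ (blockPerm perm1N b24 ++ brest), ((24*(t+1) : Nat) : Int),
       d2 ++ (blockPerm permN b24 ++ brest), ((24*(t+1) : Nat) : Int)) := by
  rw [stepA_eq]
  simp only [vals1_eq pre b24 brest t hpre hb]
  rw [writeSeq_at (blockPerm perm1N b24) d1 b24 brest _ (by rw [hd1]) (by rw [hb, length_blockPerm]; rfl)]
  simp only [vals2_eq d1 b24 brest t hd1]
  rw [writeSeq_at (blockPerm permN b24) d2 b24 brest _ (by rw [hd2]) (by rw [hb, length_blockPerm]; rfl)]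
  simp only [Prod.mk.injEq, length_blockPerm]
  refine ⟨trivial, ?_, trivial, ?_⟩ <;> (simp [perm1N, permN]; ring)

lemma loopA : ∀ (n t : Nat) (pre b d1 d2 : List Char),
    pre.length = 24*t → d1.length = 24*t → d2.length = 24*t → b.length = 24*n →
    (PySem.List.pyRange (t : Int) ((t : Int) + (n : Int)) 1).foldl (stepA (pre ++ b))
      (d1 ++ b, ((24*t : Nat) : Int), d2 ++ b, ((24*t : Nat) : Int))
    = (d1 ++ specP perm1N b n, ((24*(t+n) : Nat) : Int),
       d2 ++ specP permN b n, ((24*(t+n) : Nat) : Int)) := by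
  intro n
  induction n with
  | zero =>
    intro t pre b d1 d2 hpre hd1 hd2 hb
    have hbnil : b = [] := List.eq_nil_of_length_eq_zero (by omega)
    subst hbnil
    rw [PySem.List.pyRange_one_eq_nil (by omega)]
    simp [specP]
  | succ n ih =>
    intro t pre b d1 d2 hpre hd1 hd2 hb
    have htake : (b.take 24).length = 24 := by simp [List.length_take]; omega
    have hdrop : (b.drop 24).length = 24*n := by simp [List.length_drop]; omega
    conv_lhs => rw [← List.take_append_drop 24 b]
    rw [PySem.List.pyRange_one_cons (by push_cast; omega)]
    simp only [List.foldl_cons]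
    rw [stepA_block pre (b.take 24) (b.drop 24) d1 d2 t hpre hd1 hd2 htake]
    have e1 : pre ++ (b.take 24 ++ b.drop 24) = (pre ++ b.take 24) ++ b.drop 24 := by simp
    have e2 : d1 ++ (blockPerm perm1N (b.take 24) ++ b.drop 24)
        = (d1 ++ blockPerm perm1N (b.take 24)) ++ b.drop 24 := by simp
    have e3 : d2 ++ (blockPerm permN (b.take 24) ++ b.drop 24)
        = (d2 ++ blockPerm permN (b.take 24)) ++ b.drop 24 := by simp
    have e4 : (t : Int) + 1 = ((t+1 : Nat) : Int) := by push_cast; ring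
    have e5 : (t : Int) + ((n+1 : Nat) : Int) = ((t+1 : Nat) : Int) + (n : Int) := by push_cast; ring
    rw [e1, e2, e3, e4, e5,
        ih (t+1) (pre ++ b.take 24) (b.drop 24) (d1 ++ blockPerm perm1N (b.take 24))
          (d2 ++ blockPerm permN (b.take 24))
          (by simp [hpre, htake]; ring) (by simp [hd1, length_blockPerm, perm1N]; ring)
          (by simp [hd2, length_blockPerm, permN]; ring) hdrop]
    simp only [Prod.mk.injEq]
    refine ⟨?_, by norm_num; omega, ?_, by norm_num; omega⟩ <;>
      (conv_rhs => rw [show (n+1 : Nat) = n + 1 from rfl]) <;>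
      simp [specP, List.append_assoc]

def permI : List Int := [19,20,23,18,22,21,1,2,5,0,4,3,13,14,17,12,16,15,7,8,11,6,10,9]

lemma pyRange24_nil (a b : Int) (h : b ≤ a) : PySem.List.pyRange a b 24 = [] := by
  rw [PySem.List.pyRange_of_pos _ _ (by norm_num)]
  simp [show ¬ a < b by omega]

lemma pyRange24_cons (a b : Int) (h : a < b) :
    PySem.List.pyRange a b 24 = a :: PySem.List.pyRange (a+24) b 24 := by
  rw [PySem.List.pyRange_of_pos _ _ (by norm_num), PySem.List.pyRange_of_pos _ _ (by norm_num)]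
  by_cases h2 : a + 24 < b
  · simp only [if_pos h, if_pos h2]
    have hc : ((b - a + 24 - 1)/24).toNat = ((b - (a+24) + 24 - 1)/24).toNat + 1 := by omega
    rw [hc, List.range_succ_eq_map]
    simp only [List.map_cons, List.map_map, List.cons.injEq]
    refine ⟨by push_cast; ring, ?_⟩
    apply List.map_congr_left
    intro k _
    simp only [Function.comp]
    push_cast
    ring
  · simp only [if_pos h, if_neg h2]
    have hc : ((b - a + 24 - 1)/24).toNat = 1 := by omega
    rw [hc]
    simp

lemma loopB : ∀ (n t : Nat) (pre b : List Char),
    pre.length = 24*t → b.length = 24*n →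
    (PySem.List.pyRange ((24*t : Nat) : Int) (((24*t : Nat) : Int) + ((24*n : Nat) : Int)) 24).flatMap
      (fun base => permI.map (fun q => PySem.List.pyGetD (pre ++ b) (base + q) ' '))
    = specP permN b n := by
  intro n
  induction n with
  | zero =>
    intro t pre b hpre hb
    have hbnil : b = [] := List.eq_nil_of_length_eq_zero (by omega)
    subst hbnil
    rw [pyRange24_nil _ _ (by push_cast; omega)]
    simp [specP]
  | succ n ih =>
    intro t pre b hpre hb
    have htake : (b.take 24).length = 24 := by simp [List.length_take]; omega
    have hdrop : (b.drop 24).length = 24*n := by simp [List.length_drop]; omega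
    conv_lhs => rw [← List.take_append_drop 24 b]
    rw [pyRange24_cons _ _ (by push_cast; omega)]
    simp only [List.flatMap_cons]
    have hhead : permI.map (fun q => PySem.List.pyGetD (pre ++ (b.take 24 ++ b.drop 24)) (((24*t : Nat) : Int) + q) ' ')
        = blockPerm permN (b.take 24) := by
      simp only [permI, List.map]
      rw [readm pre (b.take 24) (b.drop 24) t 19 _ ' ' hpre (by omega) (by push_cast; ring)]
      rw [readm pre (b.take 24) (b.drop 24) t 20 _ ' ' hpre (by omega) (by push_cast; ring)]
      rw [readm pre (b.take 24) (b.drop 24) t 23 _ ' ' hpre (by omega) (by push_cast; ring)]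
      rw [readm pre (b.take 24) (b.drop 24) t 18 _ ' ' hpre (by omega) (by push_cast; ring)]
      rw [readm pre (b.take 24) (b.drop 24) t 22 _ ' ' hpre (by omega) (by push_cast; ring)]
      rw [readm pre (b.take 24) (b.drop 24) t 21 _ ' ' hpre (by omega) (by push_cast; ring)]
      rw [readm pre (b.take 24) (b.drop 24) t 1 _ ' ' hpre (by omega) (by push_cast; ring)]
      rw [readm pre (b.take 24) (b.drop 24) t 2 _ ' ' hpre (by omega) (by push_cast; ring)]
      rw [readm pre (b.take 24) (b.drop 24) t 5 _ ' ' hpre (by omega) (by push_cast; ring)]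
      rw [readm pre (b.take 24) (b.drop 24) t 0 _ ' ' hpre (by omega) (by push_cast; ring)]
      rw [readm pre (b.take 24) (b.drop 24) t 4 _ ' ' hpre (by omega) (by push_cast; ring)]
      rw [readm pre (b.take 24) (b.drop 24) t 3 _ ' ' hpre (by omega) (by push_cast; ring)]
      rw [readm pre (b.take 24) (b.drop 24) t 13 _ ' ' hpre (by omega) (by push_cast; ring)]
      rw [readm pre (b.take 24) (b.drop 24) t 14 _ ' ' hpre (by omega) (by push_cast; ring)]
      rw [readm pre (b.take 24) (b.drop 24) t 17 _ ' ' hpre (by omega) (by push_cast; ring)]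
      rw [readm pre (b.take 24) (b.drop 24) t 12 _ ' ' hpre (by omega) (by push_cast; ring)]
      rw [readm pre (b.take 24) (b.drop 24) t 16 _ ' ' hpre (by omega) (by push_cast; ring)]
      rw [readm pre (b.take 24) (b.drop 24) t 15 _ ' ' hpre (by omega) (by push_cast; ring)]
      rw [readm pre (b.take 24) (b.drop 24) t 7 _ ' ' hpre (by omega) (by push_cast; ring)]
      rw [readm pre (b.take 24) (b.drop 24) t 8 _ ' ' hpre (by omega) (by push_cast; ring)]
      rw [readm pre (b.take 24) (b.drop 24) t 11 _ ' ' hpre (by omega) (by push_cast; ring)]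
      rw [readm pre (b.take 24) (b.drop 24) t 6 _ ' ' hpre (by omega) (by push_cast; ring)]
      rw [readm pre (b.take 24) (b.drop 24) t 10 _ ' ' hpre (by omega) (by push_cast; ring)]
      rw [readm pre (b.take 24) (b.drop 24) t 9 _ ' ' hpre (by omega) (by push_cast; ring)]
      rfl
    rw [hhead]
    have e1 : pre ++ (b.take 24 ++ b.drop 24) = (pre ++ b.take 24) ++ b.drop 24 := by simp
    have e4 : ((24*t : Nat) : Int) + 24 = ((24*(t+1) : Nat) : Int) := by push_cast; ring
    have e5 : ((24*t : Nat) : Int) + ((24*(n+1) : Nat) : Int)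
        = ((24*(t+1) : Nat) : Int) + ((24*n : Nat) : Int) := by push_cast; ring
    rw [e1, e4, e5, ih (t+1) (pre ++ b.take 24) (b.drop 24) (by simp [hpre, htake]; ring) hdrop]
    conv_rhs => rw [show (n+1 : Nat) = n + 1 from rfl]
    simp [specP]

lemma h24A : ((rowsA.length : Int) * (colsA.length : Int)) = 24 := by norm_num [rowsA, colsA]

lemma padA (L : List Char) :
    (if PySem.Int.mod (L.length : Int) ((rowsA.length : Int) * (colsA.length : Int)) ≠ 0
     then L ++ List.replicate (((rowsA.length : Int) * (colsA.length : Int) - PySem.Int.mod (L.length : Int) ((rowsA.length : Int) * (colsA.length : Int))).toNat) '*'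
     else L) = padded L := by
  rw [h24A, PySem.Int.mod_eq_emod_of_pos (by norm_num)]
  unfold padded
  by_cases h : L.length % 24 = 0
  · rw [if_neg (by omega), if_pos h]
  · rw [if_pos (by omega), if_neg h]
    congr 2
    omega

lemma h24B : rowsB.length * columnsB.length = 24 := by norm_num [rowsB, columnsB]

lemma padB (L : List Char) :
    (if L.length % (rowsB.length * columnsB.length) ≠ 0
     then L ++ List.replicate ((rowsB.length * columnsB.length) - L.length % (rowsB.length * columnsB.length)) '*'
     else L) = padded L := by
  rw [h24B]
  unfold padded
  by_cases h : L.length % 24 = 0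
  · rw [if_neg (by omega), if_pos h]
  · rw [if_pos (by omega), if_neg h]

lemma padded_mult (L : List Char) : ∃ nb, (padded L).length = 24 * nb := by
  have : (padded L).length % 24 = 0 := by
    unfold padded
    split_ifs with h
    · omega
    · simp [List.length_append]
      omega
  exact ⟨(padded L).length / 24, by omega⟩

lemma permB_eval :
    (PySem.List.pyRange 0 ((24 : Nat) : Int) 1).map (fun p =>
      (PySem.List.pyGetD rowsB (PySem.Int.floordiv p 6) 0 - 1) * 6 +
      (PySem.List.pyGetD columnsB (PySem.Int.mod p 6) 0 - 1)) = permI := by decide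

-- ===== VERDICT (by name: the statement is the Claim_ definition above) =====
theorem EncodeDoublePermutation_spec : Claim_equal_EncodeDoublePermutation := by
  intro msg _
  unfold Spec_EncodeDoublePermutation
  unfold EncodeDoublePermutation EncodeDoublePermutation_alt
  simp only [padA, padB]
  obtain ⟨nb, hnb⟩ := padded_mult msg.toList
  have hfd : PySem.Int.floordiv ((padded msg.toList).length : Int) ((rowsA.length : Int) * (colsA.length : Int)) = (nb : Int) := by
    rw [h24A, PySem.Int.floordiv_eq_ediv_of_pos (by norm_num), hnb]
    push_cast
    omega
  rw [hfd, h24B, hnb]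
  have hA := loopA nb 0 [] (padded msg.toList) [] [] rfl rfl rfl (by omega)
  simp only [List.nil_append, Nat.mul_zero, Nat.cast_zero, zero_add] at hA
  rw [hA]
  have hB := loopB nb 0 [] (padded msg.toList) rfl (by omega)
  simp only [List.nil_append, Nat.mul_zero, Nat.cast_zero, zero_add] at hB
  rw [permB_eval]
  simp only [Nat.cast_ofNat]
  rw [hB]
  rw [PySem.List.foldl_pyRange_zero_pyGetD' (specP permN (padded msg.toList) nb) ' '
        (fun acc c => acc ++ [c]) [],
      PySem.List.foldl_append_singleton_eq_self]
  simp
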